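-- pv_equiv track=rewrite | github.com/robert-nicol-de/voxcore | voxcore/engine/exploration_engine.py | _get_top_dimensions
-- ===== SOURCE A (Python) =====
-- from typing import Dict, List, Any, Optional
--
-- def _estimate_query_cost(dimension: str, metric: str) -> int:
--     """
--     Quick estimate of query cost for dimension breakdown.
--
--     Args:
--         dimension: Dimension name
--         metric: Metric name
--
--     Returns:
--         Estimated cost score (0-100)
--     """
--     # Very rough heuristics (dimension cardinality matters)
--     cost_map = {
--         "region": 10,
--         "product": 15,
--         "customer": 25,      # High cardinality = higher cost
--         "month": 5,
--         "day": 8,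
--         "segment": 12,
--     }
--     return cost_map.get(dimension.lower(), 15)
--
-- def _get_top_dimensions(query_plan: Dict[str, Any], max_count: int = 3) -> List[str]:
--     """
--     Select top N most relevant dimensions based on query context.
--
--     Prioritize dimensions that are:
--     1. High cardinality (more interesting to slice)
--     2. Cost-effective to query
--     3. Semantically related to current metric
--
--     Args:
--         query_plan: Current query context (e.g. {"metric": "revenue", "filters": {...}})
--         max_count: Maximum dimensions to return
--
--     Returns:
--         List of dimension names, ordered by relevance
--     """
--     # Semantic priority map (dimension -> relevance score for context)
--     dimension_relevance = {
--         "region": 8,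
--         "product": 9,
--         "customer": 7,
--         "segment": 8,
--         "month": 6,
--         "day_of_week": 6,
--         "hour": 4,
--     }
--
--     # Filter out expensive low-value dimensions
--     suitable_dims = [
--         (dim, score) for dim, score in dimension_relevance.items()
--         if _estimate_query_cost(dim, query_plan.get("metric", "revenue")) < 70
--     ]
--
--     # Sort by relevance, take top N
--     suitable_dims.sort(key=lambda x: x[1], reverse=True)
--     top_dims = [dim for dim, _ in suitable_dims[:max_count]]
--
--     return top_dims
-- ===== SOURCE B (Python) =====
-- from typing import Dict, List, Any
--
-- # Every dimension's estimated cost (5..25, default 15) is below the 70 threshold, so A's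
-- # cost filter never removes anything, and the relevance map is a module constant: the
-- # descending-stable-sorted ranking is fixed.  B precomputes it once and only slices.
-- _RANKING: List[str] = [
--     "product",      # 9
--     "region",       # 8
--     "segment",      # 8  (ties keep insertion order: region before segment)
--     "customer",     # 7
--     "month",        # 6
--     "day_of_week",  # 6
--     "hour",         # 4
-- ]
--
-- def _get_top_dimensions(query_plan: Dict[str, Any], max_count: int = 3) -> List[str]:
--     return _RANKING[:max_count]
-- ===== Notes on version B (the rewrite author's own statement) =====
-- stated objective: simpler
-- what changed: B replaces A's build-filter-sort-slice pipeline by a precomputed constant ranking list that is only sliced: the cost filter is vacuous (all costs are at most 25, below the 70 threshold, for every metric) and the relevance map is fixed, so the descending stable order is a compile-time constant.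
import Mathlib
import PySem

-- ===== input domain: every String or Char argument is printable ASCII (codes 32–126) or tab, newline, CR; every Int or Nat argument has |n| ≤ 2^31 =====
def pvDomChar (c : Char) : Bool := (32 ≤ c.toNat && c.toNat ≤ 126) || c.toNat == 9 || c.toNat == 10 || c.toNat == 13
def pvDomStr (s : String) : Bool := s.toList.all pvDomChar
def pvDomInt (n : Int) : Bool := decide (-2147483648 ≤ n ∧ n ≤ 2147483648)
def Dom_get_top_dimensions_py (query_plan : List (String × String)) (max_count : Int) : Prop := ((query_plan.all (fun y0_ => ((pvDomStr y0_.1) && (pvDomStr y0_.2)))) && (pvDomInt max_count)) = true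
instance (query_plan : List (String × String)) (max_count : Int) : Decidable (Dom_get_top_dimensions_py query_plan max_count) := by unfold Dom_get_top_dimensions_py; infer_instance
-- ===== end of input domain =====

-- B replaces A's filter+sort+slice pipeline by slicing a precomputed constant ranking
-- (the cost filter is vacuous and the relevance map fixed); objective: simpler.

-- ===== PORT A =====
def estimate_query_cost (dimension : String) (_metric : String) : Int :=
  let cost_map : PySem.Dict String Int := PySem.Dict.mk
    [("region", 10), ("product", 15), ("customer", 25), ("month", 5), ("day", 8), ("segment", 12)]
  PySem.Dict.getD cost_map (PySem.Str.lower dimension) 15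

def get_top_dimensions_py (query_plan : List (String × String)) (max_count : Int) : List String :=
  let dimension_relevance : List (String × Int) :=
    [("region", 8), ("product", 9), ("customer", 7), ("segment", 8),
     ("month", 6), ("day_of_week", 6), ("hour", 4)]
  let suitable_dims := dimension_relevance.filter
    (fun p => decide (estimate_query_cost p.1 (PySem.Dict.getD (PySem.Dict.mk query_plan) "metric" "revenue") < 70))
  let sorted_dims := PySem.List.sorted suitable_dims (fun x => x.2) true
  (PySem.List.slice sorted_dims none (some max_count)).map (fun p => p.1)

-- ===== PORT B =====
def pvRanking : List String :=
  ["product", "region", "segment", "customer", "month", "day_of_week", "hour"]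

def get_top_dimensions_py_alt (_query_plan : List (String × String)) (max_count : Int) : List String :=
  PySem.List.slice pvRanking none (some max_count)

-- ===== PRECONDITION & SPEC =====
def Spec_get_top_dimensions_py (query_plan : List (String × String)) (max_count : Int) (out : List String) : Prop := out = get_top_dimensions_py_alt query_plan max_count
instance (query_plan : List (String × String)) (max_count : Int) (out : List String) : Decidable (Spec_get_top_dimensions_py query_plan max_count out) := by unfold Spec_get_top_dimensions_py; infer_instance

-- ===== CLAIM (what is proved, stated in full; the proofs are below) =====
def Claim_equal_get_top_dimensions_py : Prop := ∀ (query_plan : List (String × String)) (max_count : Int), Dom_get_top_dimensions_py query_plan max_count → Spec_get_top_dimensions_py query_plan max_count (get_top_dimensions_py query_plan max_count)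

-- ===== LEMMAS AND PROOFS =====

-- slicing xs[:b] commutes with map (slice only inspects the length, which map preserves)
theorem map_slice_to {α β : Type} (f : α → β) (xs : List α) (b : Int) :
    (PySem.List.slice xs none (some b)).map f
      = PySem.List.slice (xs.map f) none (some b) := by
  simp [PySem.List.slice, PySem.List.clampIdx, List.map_take]

-- ===== VERDICT (by name: the statement is the Claim_ definition above) =====
theorem get_top_dimensions_py_spec : Claim_equal_get_top_dimensions_py := by
  intro query_plan max_count _
  show get_top_dimensions_py query_plan max_count = get_top_dimensions_py_alt query_plan max_count
  -- every literal dimension's cost is < 70 regardless of the metric string (which the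
  -- cost estimate ignores), so the filter keeps all pairs and the stable descending
  -- sort of the constant map reduces definitionally to the constant ranking of pairs
  rw [show get_top_dimensions_py query_plan max_count
        = (PySem.List.slice
            [("product", (9:Int)), ("region", 8), ("segment", 8), ("customer", 7),
             ("month", 6), ("day_of_week", 6), ("hour", 4)] none (some max_count)).map
            (fun p => p.1) from rfl,
      map_slice_to]
  rfl
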